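-- pv_equiv track=rewrite | github.com/wie-florian/vu-gpa | GPA/2024SS/blatt3.py | mystery_string
-- ===== SOURCE A (Python) =====
-- def mystery_string(text, a, b, s):
--     if b <= 0:
--         return text
--     elif a <= 0:
--         return s + mystery_string(text, b, b, s)
--     elif not text:
--         return ''
--     else:
--         return text[0] + mystery_string(text[1:], a - 1, b, s)
-- ===== SOURCE B (Python) =====
-- def mystery_string(text, a, b, s):
--     # Iterative: compute block boundaries and join slices, instead of per-char recursion.
--     if b <= 0:
--         return text
--     parts = []
--     if a <= 0:
--         parts.append(s)
--         a = b
--     n = len(text)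
--     prev = 0
--     k = a
--     while k <= n:
--         parts.append(text[prev:k])
--         parts.append(s)
--         prev = k
--         k += b
--     parts.append(text[prev:])
--     return ''.join(parts)
-- ===== Notes on version B (the rewrite author's own statement) =====
-- stated objective: faster
-- what changed: Replaces A's per-character recursion (one recursive call and string copy per character) with a single iterative loop over block cut positions that joins whole slices.
import Mathlib
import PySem

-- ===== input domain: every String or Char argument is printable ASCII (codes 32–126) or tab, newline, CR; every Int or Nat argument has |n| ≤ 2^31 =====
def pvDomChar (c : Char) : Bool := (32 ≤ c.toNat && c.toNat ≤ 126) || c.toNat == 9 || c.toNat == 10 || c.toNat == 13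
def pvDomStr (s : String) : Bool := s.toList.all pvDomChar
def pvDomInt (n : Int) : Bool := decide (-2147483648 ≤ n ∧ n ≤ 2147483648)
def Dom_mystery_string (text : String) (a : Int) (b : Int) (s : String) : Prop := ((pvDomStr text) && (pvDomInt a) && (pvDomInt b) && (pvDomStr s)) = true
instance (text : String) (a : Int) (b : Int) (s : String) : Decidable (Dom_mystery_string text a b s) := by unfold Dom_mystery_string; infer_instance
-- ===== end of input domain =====

-- B replaces A's per-character recursion with one iterative loop over block cut positions that appends whole slices (objective: faster).

-- ===== PORT A =====
-- A's recursion, transliterated on the character list (text[0] = head, text[1:] = tail).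
def pvARec (cs : List Char) (a : Int) (b : Int) (s : List Char) : List Char :=
  if b ≤ 0 then cs
  else if a ≤ 0 then s ++ pvARec cs b b s
  else match cs with
    | [] => []
    | c :: rest => c :: pvARec rest (a - 1) b s
termination_by 2 * cs.length + (if a ≤ 0 then 1 else 0)
decreasing_by
  · split_ifs
    all_goals omega
  · simp only [List.length_cons]; split_ifs <;> omega

def mystery_string (text : String) (a : Int) (b : Int) (s : String) : String :=
  String.ofList (pvARec text.toList a b s.toList)

-- ===== PORT B =====
-- B's while loop 'while k <= n: append text[prev:k]; append s; prev = k; k += b', then the tail text[prev:].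
-- The '0 < b' conjunct is a totality guard only: the loop is only ever entered with 0 < b.
def pvBLoop (cs : List Char) (n : Int) (prev : Int) (k : Int) (b : Int) (s : List Char) : List Char :=
  if k ≤ n ∧ 0 < b then
    PySem.List.slice cs (some prev) (some k) ++ s ++ pvBLoop cs n k (k + b) b s
  else PySem.List.slice cs (some prev) none
termination_by (n + b - k).toNat
decreasing_by omega

def mystery_string_alt (text : String) (a : Int) (b : Int) (s : String) : String :=
  if b ≤ 0 then text
  else
    let cs := text.toList
    let n : Int := cs.length
    if a ≤ 0 then String.ofList (s.toList ++ pvBLoop cs n 0 b b s.toList)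
    else String.ofList (pvBLoop cs n 0 a b s.toList)

-- ===== PRECONDITION & SPEC =====
def Spec_mystery_string (text : String) (a : Int) (b : Int) (s : String) (out : String) : Prop := out = mystery_string_alt text a b s
instance (text : String) (a : Int) (b : Int) (s : String) (out : String) : Decidable (Spec_mystery_string text a b s out) := by unfold Spec_mystery_string; infer_instance

-- ===== CLAIM (what is proved, stated in full; the proofs are below) =====
def Claim_equal_mystery_string : Prop := ∀ (text : String) (a : Int) (b : Int) (s : String), Dom_mystery_string text a b s → Spec_mystery_string text a b s (mystery_string text a b s)

-- ===== LEMMAS AND PROOFS =====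

-- Proof-only intermediate form: the text cut into a first block of size `first`, then blocks of size b.
def pvBlocks (cs : List Char) (first : Int) (b : Int) (s : List Char) : List Char :=
  if _h : 0 < first ∧ first ≤ (cs.length : Int) then
    cs.take first.toNat ++ s ++ pvBlocks (cs.drop first.toNat) b b s
  else cs
termination_by cs.length
decreasing_by simp only [List.length_drop]; omega

theorem pvARec_eq_blocks (cs : List Char) : ∀ (a b : Int) (s : List Char),
    0 < a → 0 < b → pvARec cs a b s = pvBlocks cs a b s := by
  induction cs with
  | nil =>
    intro a b s ha hb
    rw [pvARec.eq_def, pvBlocks]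
    simp [not_le.2 ha, not_le.2 hb]
  | cons c rest ih =>
    intro a b s ha hb
    rw [pvARec.eq_def]
    simp only [not_le.2 ha, not_le.2 hb, if_false]
    have hlen : (((c :: rest).length : Nat) : Int) = (rest.length : Int) + 1 := by
      simp
    by_cases h1 : a = 1
    · subst h1
      rw [show (1:Int) - 1 = 0 from rfl]
      conv_lhs => rw [pvARec.eq_def]
      rw [if_neg (not_le.2 hb), if_pos (le_refl (0:Int))]
      rw [ih b b s hb hb]
      conv_rhs => rw [pvBlocks]
      rw [dif_pos ⟨one_pos, by omega⟩]
      simp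
    · have ha2 : 2 ≤ a := by omega
      rw [ih (a - 1) b s (by omega) hb]
      by_cases hle : a ≤ ((c :: rest).length : Int)
      · conv_rhs => rw [pvBlocks]
        rw [dif_pos ⟨ha, hle⟩]
        conv_lhs => rw [pvBlocks]
        rw [dif_pos (show 0 < a - 1 ∧ a - 1 ≤ (rest.length : Int) by omega)]
        have htake : (c :: rest).take a.toNat = c :: rest.take (a - 1).toNat := by
          have h : a.toNat = (a - 1).toNat + 1 := by omega
          rw [h]; rfl
        have hdrop : (c :: rest).drop a.toNat = rest.drop (a - 1).toNat := by
          have h : a.toNat = (a - 1).toNat + 1 := by omega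
          rw [h]; rfl
        rw [htake, hdrop]; simp
      · conv_rhs => rw [pvBlocks]
        rw [dif_neg (show ¬ (0 < a ∧ a ≤ ((c :: rest).length : Int)) by omega)]
        conv_lhs => rw [pvBlocks]
        rw [dif_neg (show ¬ (0 < a - 1 ∧ a - 1 ≤ (rest.length : Int)) by omega)]

theorem pvBLoop_eq_blocks (cs : List Char) (s : List Char) (prev k b : Int)
    (h0 : 0 ≤ prev) (hpk : prev < k) (hpl : prev ≤ (cs.length : Int)) (hb : 0 < b) :
    pvBLoop cs (cs.length : Int) prev k b s = pvBlocks (cs.drop prev.toNat) (k - prev) b s := by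
  rw [pvBLoop]
  by_cases hk : k ≤ (cs.length : Int)
  · rw [if_pos ⟨hk, hb⟩]
    conv_rhs => rw [pvBlocks]
    rw [dif_pos (show 0 < k - prev ∧ k - prev ≤ ((cs.drop prev.toNat).length : Int) by
      simp only [List.length_drop]; omega)]
    have hslice : PySem.List.slice cs (some prev) (some k) =
        (cs.drop prev.toNat).take (k - prev).toNat := by
      rw [PySem.List.slice_toNat cs h0 (by omega)]
      congr 1; omega
    have hdd : (cs.drop prev.toNat).drop (k - prev).toNat = cs.drop k.toNat := by
      rw [List.drop_drop]; congr 1; omega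
    rw [hslice, hdd, pvBLoop_eq_blocks cs s k (k + b) b (by omega) (by omega) hk hb]
    simp
  · rw [if_neg (by tauto)]
    conv_rhs => rw [pvBlocks]
    rw [dif_neg (show ¬ (0 < k - prev ∧ k - prev ≤ ((cs.drop prev.toNat).length : Int)) by
        simp only [List.length_drop]; omega),
      PySem.List.slice_from cs h0]
termination_by ((cs.length : Int) + b - k).toNat
decreasing_by omega

-- ===== VERDICT (by name: the statement is the Claim_ definition above) =====
theorem mystery_string_spec : Claim_equal_mystery_string := by
  intro text a b s _
  unfold Spec_mystery_string mystery_string mystery_string_alt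
  by_cases hb : b ≤ 0
  · rw [pvARec.eq_def, if_pos hb, if_pos hb, String.ofList_toList]
  · have hb' : 0 < b := by omega
    rw [if_neg hb]
    by_cases ha : a ≤ 0
    · rw [if_pos ha, pvARec.eq_def, if_neg hb, if_pos ha,
        pvARec_eq_blocks text.toList b b s.toList hb' hb',
        pvBLoop_eq_blocks text.toList s.toList 0 b b (le_refl 0) hb' (Int.natCast_nonneg _) hb']
      simp
    · rw [if_neg ha,
        pvARec_eq_blocks text.toList a b s.toList (by omega) hb',
        pvBLoop_eq_blocks text.toList s.toList 0 a b (le_refl 0) (by omega) (Int.natCast_nonneg _) hb']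
      simp
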